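-- pv_equiv track=rewrite | github.com/pusupalahemanthkumar/coding | Maths/02_nth_natural_number.py | nthNaturalNumber
-- ===== SOURCE A (Python) =====
-- def nthNaturalNumber(n):
--     base=9
--     ans=""
--     while(n>0):
--         r=n%base
--         n=n//base
--         ans+=str(r)
--     return ans[::-1]
-- ===== SOURCE B (Python) =====
-- def nthNaturalNumber(n):
--     if n <= 0:
--         return ""
--     return nthNaturalNumber(n // 9) + str(n % 9)
-- ===== Notes on version B (the rewrite author's own statement) =====
-- stated objective: simpler
-- what changed: Replaces the LSB-first accumulator loop plus final reversal with a direct recursion that emits the most-significant digit first, so no reversal or mutable accumulator is needed.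
import Mathlib
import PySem

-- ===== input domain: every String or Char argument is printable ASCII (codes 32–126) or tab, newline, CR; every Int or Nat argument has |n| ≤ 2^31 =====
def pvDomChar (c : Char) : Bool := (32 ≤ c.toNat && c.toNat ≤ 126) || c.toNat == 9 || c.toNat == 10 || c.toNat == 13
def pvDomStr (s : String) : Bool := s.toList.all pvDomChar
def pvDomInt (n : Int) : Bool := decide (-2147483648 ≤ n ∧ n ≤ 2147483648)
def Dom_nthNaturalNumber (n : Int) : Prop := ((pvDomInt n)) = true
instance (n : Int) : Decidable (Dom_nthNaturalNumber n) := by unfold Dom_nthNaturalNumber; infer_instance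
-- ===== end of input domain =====

-- B replaces the LSB-first accumulator loop + final reversal with an MSB-first recursion (simpler; not faster).

-- ===== PORT A =====
-- termination helper, cited by the ports' decreasing_by
theorem pv_fd9_lt (n : Int) (h : 0 < n) : (PySem.Int.floordiv n 9).toNat < n.toNat := by
  rw [PySem.Int.floordiv_eq_ediv_of_pos (by omega : (0:Int) < 9)]
  omega

-- the while-loop of A, accumulating ans (as List Char)
def nthLoopA (n : Int) (ans : List Char) : List Char :=
  if h : n > 0 then
    nthLoopA (PySem.Int.floordiv n 9) (ans ++ PySem.Int.toChars (PySem.Int.mod n 9))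
  else ans
termination_by n.toNat
decreasing_by exact pv_fd9_lt n h

-- return ans[::-1]
def nthNaturalNumber (n : Int) : String :=
  String.ofList (((PySem.List.slice? (nthLoopA n []) none none (-1)).getD []))

-- ===== PORT B =====
def nthAltChars (n : Int) : List Char :=
  if h : n ≤ 0 then []
  else nthAltChars (PySem.Int.floordiv n 9) ++ PySem.Int.toChars (PySem.Int.mod n 9)
termination_by n.toNat
decreasing_by exact pv_fd9_lt n (by omega)

def nthNaturalNumber_alt (n : Int) : String := String.ofList (nthAltChars n)

-- ===== PRECONDITION & SPEC =====
def Spec_nthNaturalNumber (n : Int) (out : String) : Prop := out = nthNaturalNumber_alt n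
instance (n : Int) (out : String) : Decidable (Spec_nthNaturalNumber n out) := by unfold Spec_nthNaturalNumber; infer_instance

-- ===== CLAIM (what is proved, stated in full; the proofs are below) =====
def Claim_equal_nthNaturalNumber : Prop := ∀ (n : Int), Dom_nthNaturalNumber n → Spec_nthNaturalNumber n (nthNaturalNumber n)

-- ===== LEMMAS AND PROOFS =====

-- loop invariant: A's loop returns ans followed by B's digits in reverse
theorem nthLoopA_eq (n : Int) (ans : List Char) :
    nthLoopA n ans = ans ++ (nthAltChars n).reverse := by
  induction n using nthAltChars.induct generalizing ans with
  | case1 n h =>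
      rw [nthLoopA, nthAltChars]
      rw [dif_neg (by omega : ¬ n > 0), dif_pos h]
      simp
  | case2 n h ih =>
      rw [nthLoopA, nthAltChars]
      rw [dif_pos (by omega : n > 0), dif_neg h, ih]
      have h0 : 0 ≤ PySem.Int.mod n 9 := PySem.Int.mod_nonneg n (by omega)
      have h9 : PySem.Int.mod n 9 < 9 := PySem.Int.mod_lt n (by omega)
      have hrev : (PySem.Int.toChars (PySem.Int.mod n 9)).reverse
          = PySem.Int.toChars (PySem.Int.mod n 9) := by
        interval_cases h : (PySem.Int.mod n 9) <;> decide
      simp only [List.reverse_append, hrev, List.append_assoc]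

-- ===== VERDICT (by name: the statement is the Claim_ definition above) =====
theorem nthNaturalNumber_spec : Claim_equal_nthNaturalNumber := by
  intro n _
  unfold Spec_nthNaturalNumber nthNaturalNumber nthNaturalNumber_alt
  rw [nthLoopA_eq, PySem.List.slice?_none_none_neg_one]
  simp
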